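-- pv_equiv track=rewrite | github.com/kjnh10/pcw | work/atcoder/arc074/D/answers/300253_iaodidi.py | solve
-- ===== SOURCE A (Python) =====
-- def solve(n, a):
--     res = -10 ** 20
--     for i in range(n, 2 * n + 1):
--         l = a[0:i]
--         r = a[i:3 * n]
--         l.sort(reverse=True)
--         r.sort()
--         res0 = sum(l[0:n]) - sum(r[0:n])
--         if res0 > res:
--             res = res0
--     return res
-- ===== SOURCE B (Python) =====
-- # Instead of re-sorting both slices from scratch for every split point, keep the
-- # prefix sorted descending and the suffix sorted ascending, growing them one
-- # element at a time by ordered insertion; combine the two tables in one pass.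
-- def _ins_desc(lst, x):
--     # insert x into a descending-sorted list, after any equal elements
--     k = 0
--     while k < len(lst) and not (lst[k] < x):
--         k += 1
--     lst.insert(k, x)
--
-- def _ins_asc(lst, x):
--     # insert x into an ascending-sorted list, after any equal elements
--     k = 0
--     while k < len(lst) and not (x < lst[k]):
--         k += 1
--     lst.insert(k, x)
--
-- def solve(n, a):
--     b = a[0:3 * n]
--     # left[j] = sum of the n largest of b[0:n+j], j = 0..n
--     pre = []
--     for x in b[0:n]:
--         _ins_desc(pre, x)
--     left = [sum(pre[0:n])]
--     for i in range(n, 2 * n):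
--         if i < len(b):
--             _ins_desc(pre, b[i])
--         left.append(sum(pre[0:n]))
--     # right[j] = sum of the n smallest of b[n+j:], j = 0..n, built right to left
--     suf = []
--     for x in b[2 * n:3 * n]:
--         _ins_asc(suf, x)
--     right = [sum(suf[0:n])]
--     for i in range(2 * n - 1, n - 1, -1):
--         if i < len(b):
--             _ins_asc(suf, b[i])
--         right.append(sum(suf[0:n]))
--     right.reverse()
--     res = -10 ** 20
--     for j in range(n + 1):
--         cand = left[j] - right[j]
--         if cand > res:
--             res = cand
--     return res
-- ===== Notes on version B (the rewrite author's own statement) =====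
-- stated objective: faster
-- what changed: A re-sorts the whole left and right slice for every split point; B maintains a descending-sorted prefix and an ascending-sorted suffix by incremental ordered insertion, tabulates the top-n/bottom-n sums once per side, and combines the two tables in a single pass.
import Mathlib
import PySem

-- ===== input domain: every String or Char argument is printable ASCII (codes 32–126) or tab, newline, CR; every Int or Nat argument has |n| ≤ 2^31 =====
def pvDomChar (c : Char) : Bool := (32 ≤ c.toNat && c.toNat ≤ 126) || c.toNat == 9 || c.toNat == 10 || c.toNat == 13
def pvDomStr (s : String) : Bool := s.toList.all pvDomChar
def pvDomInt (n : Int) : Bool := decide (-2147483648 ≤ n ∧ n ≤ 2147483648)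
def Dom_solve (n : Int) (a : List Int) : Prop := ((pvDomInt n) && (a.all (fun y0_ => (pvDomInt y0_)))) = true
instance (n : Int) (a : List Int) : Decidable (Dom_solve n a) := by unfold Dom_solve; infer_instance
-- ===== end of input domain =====

-- B replaces A's per-split re-sorting of both slices by incrementally maintained
-- sorted prefix/suffix lists (ordered insertion), tabulating the top-n/bottom-n
-- sums once per side; objective: faster.

-- ===== PORT A =====
def solve (n : Int) (a : List Int) : Int :=
  (PySem.List.pyRange n (2 * n + 1) 1).foldl
    (fun res i =>
      let l := PySem.List.slice a (some 0) (some i)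
      let r := PySem.List.slice a (some i) (some (3 * n))
      let ls := PySem.List.sorted l (fun x => x) true
      let rs := PySem.List.sorted r (fun x => x)
      let res0 := (PySem.List.slice ls (some 0) (some n)).sum -
                  (PySem.List.slice rs (some 0) (some n)).sum
      if res0 > res then res0 else res)
    (-(10 ^ 20))

-- ===== PORT B =====
-- _ins_desc: scan past the elements not smaller than x, insert x there
def insDesc : List Int → Int → List Int
  | [], x => [x]
  | y :: ys, x => if y < x then x :: y :: ys else y :: insDesc ys x

-- _ins_asc: scan past the elements not larger than x, insert x there
def insAsc : List Int → Int → List Int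
  | [], x => [x]
  | y :: ys, x => if x < y then x :: y :: ys else y :: insAsc ys x

-- body of the left loop: insert b[i] (when i is a real index), append sum(pre[0:n])
def preStep (b : List Int) (n : Int) (st : List Int × List Int) (i : Int) :
    List Int × List Int :=
  let pre := if i < (b.length : Int) then insDesc st.1 (PySem.List.pyGetD b i 0) else st.1
  (pre, st.2 ++ [(PySem.List.slice pre (some 0) (some n)).sum])

-- body of the right loop: insert b[i] (when i is a real index), append sum(suf[0:n])
def sufStep (b : List Int) (n : Int) (st : List Int × List Int) (i : Int) :
    List Int × List Int :=
  let suf := if i < (b.length : Int) then insAsc st.1 (PySem.List.pyGetD b i 0) else st.1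
  (suf, st.2 ++ [(PySem.List.slice suf (some 0) (some n)).sum])

def solve_alt (n : Int) (a : List Int) : Int :=
  let b := PySem.List.slice a (some 0) (some (3 * n))
  let pre0 := (PySem.List.slice b (some 0) (some n)).foldl insDesc []
  let left := ((PySem.List.pyRange n (2 * n) 1).foldl (preStep b n)
      (pre0, [(PySem.List.slice pre0 (some 0) (some n)).sum])).2
  let suf0 := (PySem.List.slice b (some (2 * n)) (some (3 * n))).foldl insAsc []
  let right := (((PySem.List.pyRange (2 * n - 1) (n - 1) (-1)).foldl (sufStep b n)
      (suf0, [(PySem.List.slice suf0 (some 0) (some n)).sum])).2).reverse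
  (PySem.List.pyRange 0 (n + 1) 1).foldl
    (fun res j =>
      let cand := PySem.List.pyGetD left j 0 - PySem.List.pyGetD right j 0
      if cand > res then cand else res)
    (-(10 ^ 20))

-- ===== PRECONDITION & SPEC =====
def Spec_solve (n : Int) (a : List Int) (out : Int) : Prop := out = solve_alt n a
instance (n : Int) (a : List Int) (out : Int) : Decidable (Spec_solve n a out) := by
  unfold Spec_solve; infer_instance

-- ===== CLAIM (what is proved, stated in full; the proofs are below) =====
def Claim_equal_solve : Prop := ∀ (n : Int) (a : List Int), Dom_solve n a → Spec_solve n a (solve n a)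

-- ===== LEMMAS AND PROOFS =====

-- proof-only abbreviations
def sortD (xs : List Int) : List Int := PySem.List.sorted xs (fun x => x) true
def sortA (xs : List Int) : List Int := PySem.List.sorted xs (fun x => x)
def lv (N : Nat) (b : List Int) (m : Nat) : Int := ((sortD (b.take m)).take N).sum
def rv (N : Nat) (b : List Int) (m : Nat) : Int := ((sortA (b.drop m)).take N).sum

theorem insDesc_eq (xs : List Int) (x : Int) :
    insDesc xs x = PySem.List.insertBy (fun a b => decide (b < a)) x xs := by
  induction xs with
  | nil => rfl
  | cons y ys ih => simp [insDesc, PySem.List.insertBy, ih]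

theorem insAsc_eq (xs : List Int) (x : Int) :
    insAsc xs x = PySem.List.insertBy (fun a b => decide (a < b)) x xs := by
  induction xs with
  | nil => rfl
  | cons y ys ih => simp [insAsc, PySem.List.insertBy, ih]

theorem foldD (xs : List Int) : xs.foldl insDesc [] = sortD xs := by
  rw [sortD, PySem.List.sorted_rev_eq_foldl_insertBy]
  exact List.foldl_ext _ _ _ (fun s x _ => insDesc_eq s x)

theorem foldA (xs : List Int) : xs.foldl insAsc [] = sortA xs := by
  rw [sortA, PySem.List.sorted_eq_foldl_insertBy]
  exact List.foldl_ext _ _ _ (fun s x _ => insAsc_eq s x)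

theorem snocD (xs : List Int) (x : Int) : insDesc (sortD xs) x = sortD (xs ++ [x]) := by
  rw [← foldD, ← foldD, List.foldl_append]
  rfl

theorem snocA (xs : List Int) (x : Int) : insAsc (sortA xs) x = sortA (xs ++ [x]) := by
  rw [← foldA, ← foldA, List.foldl_append]
  rfl

theorem sortA_snoc_cons (xs : List Int) (x : Int) : sortA (xs ++ [x]) = sortA (x :: xs) := by
  exact PySem.List.sorted_eq_sorted_of_perm _ _ _ (fun _ _ h => h)
    (List.perm_append_singleton x xs)

theorem preStep_char (b : List Int) (N m : Nat) (st2 : List Int) :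
    preStep b (N : Int) (sortD (b.take m), st2) (m : Int)
      = (sortD (b.take (m + 1)), st2 ++ [lv N b (m + 1)]) := by
  have hsl : ∀ xs : List Int, PySem.List.slice xs (some 0) (some (N : Int)) = xs.take N := by
    intro xs; rw [PySem.List.slice_zero_start, PySem.List.slice_to_natCast]
  by_cases h : m < b.length
  · have h' : (m : Int) < (b.length : Int) := by exact_mod_cast h
    have hget : PySem.List.pyGetD b (m : Int) 0 = b[m] := by
      rw [PySem.List.pyGetD_natCast, List.getD_eq_getElem _ _ h]
    have htake : b.take m ++ [b[m]] = b.take (m + 1) := by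
      rw [List.take_add_one]; simp [List.getElem?_eq_getElem h]
    simp only [preStep, if_pos h', hget, snocD, htake, hsl, lv]
  · have h' : ¬ (m : Int) < (b.length : Int) := by
      intro hc; exact h (by exact_mod_cast hc)
    have ht : b.take m = b := List.take_of_length_le (by omega)
    have ht1 : b.take (m + 1) = b := List.take_of_length_le (by omega)
    simp only [preStep, if_neg h', ht, ht1, hsl, lv]

theorem sufStep_char (b : List Int) (N m : Nat) (st2 : List Int) :
    sufStep b (N : Int) (sortA (b.drop (m + 1)), st2) (m : Int)
      = (sortA (b.drop m), st2 ++ [rv N b m]) := by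
  have hsl : ∀ xs : List Int, PySem.List.slice xs (some 0) (some (N : Int)) = xs.take N := by
    intro xs; rw [PySem.List.slice_zero_start, PySem.List.slice_to_natCast]
  by_cases h : m < b.length
  · have h' : (m : Int) < (b.length : Int) := by exact_mod_cast h
    have hget : PySem.List.pyGetD b (m : Int) 0 = b[m] := by
      rw [PySem.List.pyGetD_natCast, List.getD_eq_getElem _ _ h]
    have hdrop : b.drop m = b[m] :: b.drop (m + 1) := List.drop_eq_getElem_cons h
    simp only [sufStep, if_pos h', hget, snocA, sortA_snoc_cons, hsl, rv, hdrop]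
  · have h' : ¬ (m : Int) < (b.length : Int) := by
      intro hc; exact h (by exact_mod_cast hc)
    have ht : b.drop m = [] := List.drop_eq_nil_of_le (by omega)
    have ht1 : b.drop (m + 1) = [] := List.drop_eq_nil_of_le (by omega)
    simp only [sufStep, if_neg h', ht, ht1, hsl, rv]

theorem preLoop (b : List Int) (N : Nat) :
    ∀ (c m : Nat) (acc : List Int),
      (((PySem.List.pyRange (m : Int) ((m : Int) + (c : Int)) 1).foldl (preStep b (N : Int))
        (sortD (b.take m), acc)).2)
      = acc ++ (List.range c).map (fun k => lv N b (m + 1 + k)) := by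
  intro c
  induction c with
  | zero =>
    intro m acc
    rw [PySem.List.pyRange_one_eq_nil (by push_cast; omega)]
    simp
  | succ c ih =>
    intro m acc
    rw [PySem.List.pyRange_one_cons (by push_cast; omega)]
    rw [List.foldl_cons, preStep_char]
    have h1 : (m : Int) + 1 = ((m + 1 : Nat) : Int) := by push_cast; ring
    have h2 : (m : Int) + ((c + 1 : Nat) : Int) = ((m + 1 : Nat) : Int) + (c : Int) := by
      push_cast; ring
    rw [h2, h1, ih (m + 1)]
    rw [List.range_succ_eq_map, List.map_cons, List.map_map]
    simp only [List.append_assoc, List.singleton_append, Nat.add_zero]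
    congr 2
    apply List.map_congr_left
    intro k _
    exact congrArg (lv N b) (by omega)

theorem sufLoop (b : List Int) (N : Nat) :
    ∀ (c m : Nat) (acc : List Int), c ≤ m →
      (((PySem.List.pyRange ((m : Int) - 1) ((m : Int) - (c : Int) - 1) (-1)).foldl
          (sufStep b (N : Int)) (sortA (b.drop m), acc)).2)
      = acc ++ (List.range c).map (fun k => rv N b (m - 1 - k)) := by
  intro c
  induction c with
  | zero =>
    intro m acc _
    rw [PySem.List.pyRange_neg_one_eq_nil (by push_cast; omega)]
    simp
  | succ c ih =>
    intro m acc hcm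
    rw [PySem.List.pyRange_neg_one_cons (by push_cast; omega)]
    have hm1 : (m : Int) - 1 = ((m - 1 : Nat) : Int) := by
      have : 1 ≤ m := by omega
      push_cast [this]; ring
    have hst : sortA (b.drop m) = sortA (b.drop ((m - 1) + 1)) := by
      rw [Nat.sub_add_cancel (by omega : 1 ≤ m)]
    rw [List.foldl_cons, hm1, hst, sufStep_char]
    have h2 : ((m - 1 : Nat) : Int) - 1 = ((m - 1 : Nat) : Int) - ((0 : Nat) : Int) - 1 := by
      push_cast; ring
    have h3 : (m : Int) - ((c + 1 : Nat) : Int) - 1 = ((m - 1 : Nat) : Int) - (c : Int) - 1 := by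
      have : 1 ≤ m := by omega
      push_cast [this]; ring
    rw [h3, ih (m - 1) _ (by omega)]
    rw [List.range_succ_eq_map, List.map_cons, List.map_map]
    simp only [List.append_assoc, List.singleton_append, Nat.sub_zero]
    congr 2
    apply List.map_congr_left
    intro k _
    exact congrArg (rv N b) (by omega)

theorem reverseMapRange {α : Type} (f : Nat → α) (c : Nat) :
    (((List.range c).map f).reverse) = (List.range c).map (fun k => f (c - 1 - k)) := by
  apply List.ext_getElem
  · simp
  · intro i h1 h2
    simp only [List.length_reverse, List.length_map, List.length_range] at h1
    simp [List.getElem_reverse, List.getElem_map, List.getElem_range]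

theorem getMapRange {α : Type} (f : Nat → α) (c k : Nat) (d : α) (hk : k < c) :
    PySem.List.pyGetD ((List.range c).map f) (k : Int) d = f k := by
  rw [PySem.List.pyGetD_natCast]
  rw [List.getD_eq_getElem _ _ (by simpa using hk)]
  simp

theorem foldMax_map (E : Int → Int) (l : List Int) (init : Int) :
    l.foldl (fun res i => if E i > res then E i else res) init
      = (l.map E).foldl (fun res v => if v > res then v else res) init := by
  induction l generalizing init <;> simp [*]

theorem solveA_closed (N : Nat) (a : List Int) :
    solve (N : Int) a
      = ((List.range (N + 1)).map
          (fun k => lv N (a.take (3 * N)) (N + k) - rv N (a.take (3 * N)) (N + k))).foldl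
          (fun res v => if v > res then v else res) (-(10 ^ 20)) := by
  simp only [solve]
  rw [PySem.List.pyRange_one]
  rw [show ((2 * (N : Int) + 1 - (N : Int)).toNat) = N + 1 by omega]
  rw [foldMax_map, List.map_map]
  congr 1
  apply List.map_congr_left
  intro k hk
  have hk' : k ≤ N := by simpa [Nat.lt_succ_iff] using hk
  have hi : (N : Int) + (k : Int) = ((N + k : Nat) : Int) := by push_cast; ring
  simp only [Function.comp_apply, hi]
  have hl : PySem.List.slice a (some 0) (some ((N + k : Nat) : Int)) = a.take (N + k) := by
    rw [PySem.List.slice_zero_start, PySem.List.slice_to_natCast]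
  have hr : PySem.List.slice a (some ((N + k : Nat) : Int)) (some (3 * (N : Int)))
      = ((a.drop (N + k)).take (3 * N - (N + k))) := by
    rw [show (3 * (N : Int)) = ((3 * N : Nat) : Int) by push_cast; ring, PySem.List.slice_natCast]
  have hN' : ∀ xs : List Int, PySem.List.slice xs (some 0) (some ((N : Nat) : Int)) = xs.take N := by
    intro xs; rw [PySem.List.slice_zero_start, PySem.List.slice_to_natCast]
  rw [hl, hr, hN', hN']
  have htk : (a.take (3 * N)).take (N + k) = a.take (N + k) := by
    rw [List.take_take]; congr 1; omega
  have hdr : (a.take (3 * N)).drop (N + k) = (a.drop (N + k)).take (3 * N - (N + k)) :=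
    List.drop_take
  rw [lv, rv, htk, hdr, sortD, sortA]

theorem solveB_closed (N : Nat) (a : List Int) :
    solve_alt (N : Int) a
      = ((List.range (N + 1)).map
          (fun k => lv N (a.take (3 * N)) (N + k) - rv N (a.take (3 * N)) (N + k))).foldl
          (fun res v => if v > res then v else res) (-(10 ^ 20)) := by
  simp only [solve_alt]
  have hb : PySem.List.slice a (some 0) (some (3 * (N : Int))) = a.take (3 * N) := by
    rw [PySem.List.slice_zero_start,
      show (3 * (N : Int)) = ((3 * N : Nat) : Int) by push_cast; ring,
      PySem.List.slice_to_natCast]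
  rw [hb]
  set b := a.take (3 * N) with hbdef
  have hblen : b.length ≤ 3 * N := by rw [hbdef]; exact List.length_take_le _ _
  rw [show (3 * (N : Int)) = ((3 * N : Nat) : Int) by push_cast; ring]
  rw [show (2 * (N : Int) - 1) = ((2 * N : Nat) : Int) - 1 by push_cast; ring]
  rw [show (2 * (N : Int)) = ((2 * N : Nat) : Int) by push_cast; ring]
  simp only [PySem.List.slice_zero_start, PySem.List.slice_to_natCast, PySem.List.slice_natCast]
  rw [foldD]
  rw [List.take_of_length_le (show (b.drop (2 * N)).length ≤ 3 * N - 2 * N by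
    rw [List.length_drop]; omega)]
  rw [foldA]
  rw [show PySem.List.pyRange ((N : Nat) : Int) ((2 * N : Nat) : Int) 1
      = PySem.List.pyRange ((N : Nat) : Int) (((N : Nat) : Int) + ((N : Nat) : Int)) 1 by
    congr 1; push_cast; ring]
  rw [preLoop b N N N]
  rw [show ((N : Nat) : Int) - 1 = ((2 * N : Nat) : Int) - ((N : Nat) : Int) - 1 by
    push_cast; ring]
  rw [sufLoop b N N (2 * N) ([((sortA (b.drop (2 * N))).take N).sum]) (by omega)]
  rw [List.reverse_append, reverseMapRange]
  rw [PySem.List.pyRange_one, show ((N : Int) + 1 - 0).toNat = N + 1 by omega]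
  rw [List.reverse_singleton, foldMax_map, List.map_map]
  congr 1
  apply List.map_congr_left
  intro k hk
  have hk' : k < N + 1 := by simpa using hk
  simp only [Function.comp_apply, zero_add]
  have hleft : [((sortD (b.take N)).take N).sum] ++ (List.range N).map (fun k => lv N b (N + 1 + k))
      = (List.range (N + 1)).map (fun k => lv N b (N + k)) := by
    rw [List.range_succ_eq_map, List.map_cons, List.map_map]
    rw [List.singleton_append]
    have h0 : ((sortD (b.take N)).take N).sum = lv N b (N + 0) := by simp [lv]
    rw [h0]
    congr 1
    apply List.map_congr_left
    intro j _
    exact congrArg (lv N b) (by omega)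
  have hright : (List.range N).map (fun k => rv N b (2 * N - 1 - (N - 1 - k)))
        ++ [((sortA (b.drop (2 * N))).take N).sum]
      = (List.range (N + 1)).map (fun k => rv N b (N + k)) := by
    rw [List.range_succ, List.map_append]
    congr 1
    · apply List.map_congr_left
      intro j hj
      have : j < N := by simpa using hj
      exact congrArg (rv N b) (by omega)
    · simp only [List.map_cons, List.map_nil]
      congr 2
      simp [two_mul]
  rw [hleft, hright, getMapRange _ _ _ _ hk', getMapRange _ _ _ _ hk']

theorem solve_eq_alt (n : Int) (a : List Int) : solve n a = solve_alt n a := by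
  by_cases hn : 0 ≤ n
  · obtain ⟨N, hN⟩ := Int.le.dest hn
    have hn' : n = (N : Int) := by omega
    subst hn'
    rw [solveA_closed, solveB_closed]
  · simp only [solve, solve_alt]
    rw [PySem.List.pyRange_one_eq_nil (show 2 * n + 1 ≤ n by omega)]
    rw [PySem.List.pyRange_one_eq_nil (show n + 1 ≤ 0 by omega)]
    simp

-- ===== VERDICT (by name: the statement is the Claim_ definition above) =====
theorem solve_spec : Claim_equal_solve := by
  intro n a _
  exact solve_eq_alt n a
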